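-- pv_equiv track=rewrite | github.com/FR1G0/StringComp | string_comparator.py | stabilise_patient
-- ===== SOURCE A (Python) =====
-- def stabilise_patient(string):
--     '''Make string following standarts'''
--     #Define the blacklists
--     word_bl = ['a' ,"is", "it", "for",
--                "it's", "an" ,"as", "and",
--                "the", "has", "this",
--                "that", "there"]
--     char_bl = ['.', ',', '?', '!']
--     #Remove unnecessary stuff
--     word, neat = '', ''
--     for entry in string:
--         if entry == ' ':
--             if not word in word_bl:
--                 neat += f"{word} "
--             word = ''
--         elif not entry in char_bl:
--              word += entry.lower()
--     return(neat)
-- ===== SOURCE B (Python) =====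
-- def stabilise_patient(string):
--     '''Make string following standarts'''
--     word_bl = ['a', "is", "it", "for",
--                "it's", "an", "as", "and",
--                "the", "has", "this",
--                "that", "there"]
--     char_bl = ['.', ',', '?', '!']
--     norm = ''.join(c.lower() for c in string if c not in char_bl)
--     parts = norm.split(' ')
--     return ''.join(w + ' ' for w in parts[:-1] if w not in word_bl)
-- ===== Notes on version B (the rewrite author's own statement) =====
-- stated objective: idiomatic
-- what changed: Replaces A's character-by-character accumulator state machine with a whole-string pipeline: normalize once (delete blacklisted chars, lowercase), split on the space character keeping empty segments, drop the trailing segment, and join the non-blacklisted tokens.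
import Mathlib
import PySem

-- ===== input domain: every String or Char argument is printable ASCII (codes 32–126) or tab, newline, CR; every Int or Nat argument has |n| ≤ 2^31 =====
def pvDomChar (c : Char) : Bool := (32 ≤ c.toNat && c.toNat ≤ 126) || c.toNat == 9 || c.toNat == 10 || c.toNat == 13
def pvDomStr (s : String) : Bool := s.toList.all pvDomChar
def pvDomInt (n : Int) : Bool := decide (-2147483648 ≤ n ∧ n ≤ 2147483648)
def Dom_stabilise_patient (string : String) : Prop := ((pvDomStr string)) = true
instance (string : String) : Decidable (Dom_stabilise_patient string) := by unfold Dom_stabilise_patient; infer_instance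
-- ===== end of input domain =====

-- B normalizes the whole string first (delete blacklisted chars, lowercase), then splits on the space character,
-- drops the trailing segment and joins the non-blacklisted tokens — idiomatic, instead of A's
-- character-by-character accumulator state machine; same return value.

-- the two blacklists (module constants of both Pythons)
def pvWordBl : List (List Char) :=
  ["a".toList, "is".toList, "it".toList, "for".toList,
   "it's".toList, "an".toList, "as".toList, "and".toList,
   "the".toList, "has".toList, "this".toList,
   "that".toList, "there".toList]
def pvCharBl : List Char := ['.', ',', '?', '!']

-- ===== PORT A =====
-- the for-loop over the characters, state (word, neat)
def stabLoop (word neat : List Char) : List Char → List Char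
  | [] => neat
  | entry :: rest =>
    if entry = ' ' then
      if ¬ word ∈ pvWordBl then stabLoop [] (neat ++ word ++ [' ']) rest
      else stabLoop [] neat rest
    else if ¬ entry ∈ pvCharBl then
      stabLoop (word ++ [PySem.Chars.lowerChar entry]) neat rest
    else stabLoop word neat rest

def stabilise_patient (string : String) : String :=
  String.ofList (stabLoop [] [] string.toList)

-- ===== PORT B =====
def stabilise_patient_alt (string : String) : String :=
  let norm := (string.toList.filter (fun c => decide (¬ c ∈ pvCharBl))).map PySem.Chars.lowerChar
  let parts := PySem.Chars.splitOn norm [' ']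
  let kept := PySem.List.slice parts none (some (-1))
  String.ofList (PySem.Chars.join [] ((kept.filter (fun w => decide (¬ w ∈ pvWordBl))).map (fun w => w ++ [' '])))

-- ===== PRECONDITION & SPEC =====
def Spec_stabilise_patient (string : String) (out : String) : Prop := out = stabilise_patient_alt string
instance (string : String) (out : String) : Decidable (Spec_stabilise_patient string out) := by unfold Spec_stabilise_patient; infer_instance

-- ===== CLAIM (what is proved, stated in full; the proofs are below) =====
def Claim_equal_stabilise_patient : Prop := ∀ (string : String), Dom_stabilise_patient string → Spec_stabilise_patient string (stabilise_patient string)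

-- ===== LEMMAS AND PROOFS =====

-- structural version of str.split(' ') (keeping empty segments)
def mySplit : List Char → List (List Char)
  | [] => [[]]
  | c :: cs => if c = ' ' then [] :: mySplit cs else
      match mySplit cs with
      | [] => [[c]]
      | t :: ts => (c :: t) :: ts

-- prepend w onto the first segment
def consHead (w : List Char) : List (List Char) → List (List Char)
  | [] => [w]
  | t :: ts => (w ++ t) :: ts

-- tokens still to be emitted by A's loop when the partial word is w
def splitAcc (w : List Char) : List Char → List (List Char)
  | [] => [w]
  | c :: cs =>
    if c = ' ' then w :: splitAcc [] cs
    else if ¬ c ∈ pvCharBl then splitAcc (w ++ [PySem.Chars.lowerChar c]) cs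
    else splitAcc w cs

-- A's emission of a token list
def emit (neat : List Char) (ts : List (List Char)) : List Char :=
  ts.foldl (fun acc w => if ¬ w ∈ pvWordBl then acc ++ w ++ [' '] else acc) neat

-- normalized character list, as B computes it
def normC (cs : List Char) : List Char :=
  (cs.filter (fun c => decide (¬ c ∈ pvCharBl))).map PySem.Chars.lowerChar

-- small-step equations
theorem splitAcc_space (w : List Char) (cs : List Char) :
    splitAcc w (' ' :: cs) = w :: splitAcc [] cs := by simp [splitAcc]
theorem splitAcc_bl {c : Char} (w : List Char) (cs : List Char) (hc : c ≠ ' ') (hb : c ∈ pvCharBl) :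
    splitAcc w (c :: cs) = splitAcc w cs := by simp [splitAcc, hc, hb]
theorem splitAcc_other {c : Char} (w : List Char) (cs : List Char) (hc : c ≠ ' ') (hb : ¬ c ∈ pvCharBl) :
    splitAcc w (c :: cs) = splitAcc (w ++ [PySem.Chars.lowerChar c]) cs := by
  simp [splitAcc, hc, hb]
theorem normC_space (cs : List Char) : normC (' ' :: cs) = ' ' :: normC cs := by
  simp [normC, show (' ' ∉ pvCharBl) from by decide,
        show PySem.Chars.lowerChar ' ' = ' ' from by decide]
theorem normC_bl {c : Char} (cs : List Char) (hb : c ∈ pvCharBl) : normC (c :: cs) = normC cs := by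
  simp [normC, hb]
theorem normC_other {c : Char} (cs : List Char) (hb : ¬ c ∈ pvCharBl) :
    normC (c :: cs) = PySem.Chars.lowerChar c :: normC cs := by
  simp [normC, hb]
theorem mySplit_space (cs : List Char) : mySplit (' ' :: cs) = [] :: mySplit cs := by simp [mySplit]
theorem emit_cons_bl {t : List Char} (neat : List Char) (ts : List (List Char)) (hw : t ∈ pvWordBl) :
    emit neat (t :: ts) = emit neat ts := by simp [emit, hw]
theorem emit_cons_ok {t : List Char} (neat : List Char) (ts : List (List Char)) (hw : ¬ t ∈ pvWordBl) :
    emit neat (t :: ts) = emit (neat ++ t ++ [' ']) ts := by simp [emit, hw]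
theorem stabLoop_space_bl {w : List Char} (neat cs : List Char) (hw : w ∈ pvWordBl) :
    stabLoop w neat (' ' :: cs) = stabLoop [] neat cs := by simp [stabLoop, hw]
theorem stabLoop_space_ok {w : List Char} (neat cs : List Char) (hw : ¬ w ∈ pvWordBl) :
    stabLoop w neat (' ' :: cs) = stabLoop [] (neat ++ w ++ [' ']) cs := by simp [stabLoop, hw]
theorem stabLoop_bl {c : Char} (w neat cs : List Char) (hc : c ≠ ' ') (hb : c ∈ pvCharBl) :
    stabLoop w neat (c :: cs) = stabLoop w neat cs := by simp [stabLoop, hc, hb]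
theorem stabLoop_other {c : Char} (w neat cs : List Char) (hc : c ≠ ' ') (hb : ¬ c ∈ pvCharBl) :
    stabLoop w neat (c :: cs) = stabLoop (w ++ [PySem.Chars.lowerChar c]) neat cs := by
  simp [stabLoop, hc, hb]

theorem lowerChar_ne_space (c : Char) (h : c ≠ ' ') : PySem.Chars.lowerChar c ≠ ' ' := by
  unfold PySem.Chars.lowerChar PySem.Chars.isupper
  split
  · next hc =>
    simp [Char.le_def] at hc
    have h1 : 65 ≤ c.toNat := hc.1
    have h2 : c.toNat ≤ 90 := hc.2
    intro he
    have h3 := congrArg Char.toNat he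
    rw [Char.toNat_ofNat] at h3
    have hv : (c.toNat + 32).isValidChar := Or.inl (by omega)
    rw [if_pos hv] at h3
    have : (' ').toNat = 32 := rfl
    omega
  · exact h

theorem mySplit_ne_nil (cs : List Char) : mySplit cs ≠ [] := by
  cases cs with
  | nil => simp [mySplit]
  | cons c cs =>
    unfold mySplit
    split
    · simp
    · split <;> simp

theorem consHead_nil {ts : List (List Char)} (h : ts ≠ []) : consHead [] ts = ts := by
  cases ts with
  | nil => exact absurd rfl h
  | cons t ts => simp [consHead]

theorem consHead_consHead (w v : List Char) (ts : List (List Char)) :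
    consHead w (consHead v ts) = consHead (w ++ v) ts := by
  cases ts <;> simp [consHead]

theorem mySplit_cons_ne (c : Char) (cs : List Char) (h : c ≠ ' ') :
    mySplit (c :: cs) = consHead [c] (mySplit cs) := by
  cases hm : mySplit cs with
  | nil => exact absurd hm (mySplit_ne_nil cs)
  | cons t ts => simp [mySplit, h, hm, consHead]

theorem splitOn_go_spec (fuel : Nat) :
    ∀ (l cur : List Char) (accs : List (List Char)), l.length < fuel →
      PySem.Chars.splitOn.go [' '] fuel l cur accs = accs.reverse ++ consHead cur.reverse (mySplit l) := by
  induction fuel with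
  | zero => intro l cur accs h; omega
  | succ fuel ih =>
    intro l cur accs h
    cases l with
    | nil =>
      simp [PySem.Chars.splitOn.go, mySplit, consHead]
    | cons c rest =>
      unfold PySem.Chars.splitOn.go
      by_cases hc : c = ' '
      · subst hc
        rw [if_pos (by simp [List.isPrefixOf])]
        rw [ih _ [] _ (by simpa using Nat.lt_of_succ_lt_succ h)]
        rw [mySplit_space]
        simp [consHead]
        cases hm : mySplit rest with
        | nil => exact absurd hm (mySplit_ne_nil rest)
        | cons t ts => simp
      · rw [if_neg (by simp [List.isPrefixOf]; exact fun he => hc he.symm)]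
        rw [ih _ _ _ (by simpa using Nat.lt_of_succ_lt_succ h)]
        rw [mySplit_cons_ne c rest hc]
        rw [consHead_consHead]
        simp

theorem splitOn_space (l : List Char) : PySem.Chars.splitOn l [' '] = mySplit l := by
  unfold PySem.Chars.splitOn
  rw [splitOn_go_spec (l.length + 1) l [] [] (by omega)]
  simpa using consHead_nil (mySplit_ne_nil l)

theorem splitAcc_eq (cs : List Char) : ∀ w, splitAcc w cs = consHead w (mySplit (normC cs)) := by
  induction cs with
  | nil => intro w; simp [splitAcc, normC, mySplit, consHead]
  | cons c cs ih =>
    intro w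
    by_cases hc : c = ' '
    · subst hc
      rw [splitAcc_space, normC_space, mySplit_space, ih []]
      rw [consHead_nil (mySplit_ne_nil (normC cs))]
      cases hm : mySplit (normC cs) with
      | nil => exact absurd hm (mySplit_ne_nil _)
      | cons t ts => simp [consHead]
    · by_cases hb : c ∈ pvCharBl
      · rw [splitAcc_bl w cs hc hb, normC_bl cs hb, ih]
      · rw [splitAcc_other w cs hc hb, normC_other cs hb,
            mySplit_cons_ne _ _ (lowerChar_ne_space c hc), consHead_consHead, ih]

theorem splitAcc_ne_nil (w : List Char) (cs : List Char) : splitAcc w cs ≠ [] := by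
  rw [splitAcc_eq]
  cases hm : mySplit (normC cs) with
  | nil => exact absurd hm (mySplit_ne_nil _)
  | cons t ts => simp [consHead]

theorem stabLoop_eq_emit (cs : List Char) : ∀ w neat,
    stabLoop w neat cs = emit neat (splitAcc w cs).dropLast := by
  induction cs with
  | nil => intro w neat; simp [stabLoop, splitAcc, emit]
  | cons c cs ih =>
    intro w neat
    by_cases hc : c = ' '
    · subst hc
      rw [splitAcc_space, List.dropLast_cons_of_ne_nil (splitAcc_ne_nil [] cs)]
      by_cases hw : w ∈ pvWordBl
      · rw [stabLoop_space_bl neat cs hw, emit_cons_bl neat _ hw, ih]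
      · rw [stabLoop_space_ok neat cs hw, emit_cons_ok neat _ hw, ih]
    · by_cases hb : c ∈ pvCharBl
      · rw [stabLoop_bl w neat cs hc hb, splitAcc_bl w cs hc hb, ih]
      · rw [stabLoop_other w neat cs hc hb, splitAcc_other w cs hc hb, ih]

theorem join_nil_flatten (l : List (List Char)) : PySem.Chars.join [] l = l.flatten := by
  unfold PySem.Chars.join
  unfold List.intercalate
  induction l with
  | nil => rfl
  | cons x xs ih => cases xs <;> simp_all [List.intersperse]

theorem emit_eq_join (ts : List (List Char)) : ∀ neat,
    emit neat ts = neat ++ PySem.Chars.join [] ((ts.filter (fun w => decide (¬ w ∈ pvWordBl))).map (fun w => w ++ [' '])) := by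
  induction ts with
  | nil => intro neat; simp [emit, PySem.Chars.join, List.intercalate]
  | cons t ts ih =>
    intro neat
    by_cases hw : t ∈ pvWordBl
    · rw [emit_cons_bl neat ts hw, ih]
      congr 2
      simp [hw]
    · rw [emit_cons_ok neat ts hw, ih]
      rw [show (List.filter (fun w => decide (¬ w ∈ pvWordBl)) (t :: ts)) = t :: List.filter (fun w => decide (¬ w ∈ pvWordBl)) ts by
        simp [hw]]
      simp [join_nil_flatten]

-- ===== VERDICT (by name: the statement is the Claim_ definition above) =====
theorem stabilise_patient_spec : Claim_equal_stabilise_patient := by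
  intro string _
  unfold Spec_stabilise_patient stabilise_patient stabilise_patient_alt
  dsimp only
  rw [stabLoop_eq_emit]
  rw [splitAcc_eq, consHead_nil (mySplit_ne_nil _)]
  rw [show ((string.toList.filter (fun c => decide (¬ c ∈ pvCharBl))).map PySem.Chars.lowerChar) = normC string.toList from rfl]
  rw [splitOn_space, PySem.List.slice_to_neg_one]
  rw [emit_eq_join]
  simp
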